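-- pv_equiv track=rewrite | github.com/we1yq/OR_sim_planner | k8s-extension-prototype/controller/observe/observed_layout.py | _profiles_to_intervals
-- ===== SOURCE A (Python) =====
-- PROFILE_SIZE = {
--     "1g": 1,
--     "1g.5gb": 1,
--     "2g": 2,
--     "2g.10gb": 2,
--     "3g": 3,
--     "3g.20gb": 3,
--     "4g": 4,
--     "4g.20gb": 4,
--     "7g": 7,
--     "7g.40gb": 7,
-- }
--
-- def _profiles_to_intervals(profiles: list[str]) -> list[tuple[int, int, str]]:
--     intervals = []
--     cur = 0
--     for profile in profiles:
--         size = int(PROFILE_SIZE[profile])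
--         intervals.append((cur, cur + size, profile))
--         cur += size
--     if cur < 7:
--         intervals.append((cur, 7, "void"))
--     return intervals
-- ===== SOURCE B (Python) =====
-- PROFILE_SIZE = {
--     "1g": 1,
--     "1g.5gb": 1,
--     "2g": 2,
--     "2g.10gb": 2,
--     "3g": 3,
--     "3g.20gb": 3,
--     "4g": 4,
--     "4g.20gb": 4,
--     "7g": 7,
--     "7g.40gb": 7,
-- }
--
-- def _profiles_to_intervals(profiles):
--     # Build back-to-front: compute the total first, append the void filler
--     # first, then walk the profiles in reverse, decrementing the offset,
--     # and reverse the result at the end.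
--     sizes = [PROFILE_SIZE[p] for p in profiles]
--     total = sum(sizes)
--     out = [(total, 7, "void")] if total < 7 else []
--     cur = total
--     for p, s in zip(reversed(profiles), reversed(sizes)):
--         out.append((cur - s, cur, p))
--         cur -= s
--     out.reverse()
--     return out
-- ===== Notes on version B (the rewrite author's own statement) =====
-- stated objective: alternative
-- what changed: B replaces A's forward running-offset append loop by computing the total via sum first, seeding the 'void' filler, then building the interval list back-to-front over the reversed profiles and reversing it at the end.
import Mathlib
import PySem

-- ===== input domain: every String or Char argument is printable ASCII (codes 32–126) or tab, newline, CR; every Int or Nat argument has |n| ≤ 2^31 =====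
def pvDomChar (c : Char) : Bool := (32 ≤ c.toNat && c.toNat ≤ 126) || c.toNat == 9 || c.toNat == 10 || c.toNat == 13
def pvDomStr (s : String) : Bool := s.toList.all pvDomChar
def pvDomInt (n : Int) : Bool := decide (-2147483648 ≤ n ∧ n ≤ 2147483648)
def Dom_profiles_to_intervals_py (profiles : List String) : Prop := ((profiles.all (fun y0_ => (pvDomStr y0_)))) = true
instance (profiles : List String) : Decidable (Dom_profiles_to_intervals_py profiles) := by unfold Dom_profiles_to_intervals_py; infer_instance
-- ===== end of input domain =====

-- B builds the list back-to-front from the precomputed total instead of A's forward running-offset loop.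
-- Both raise KeyError on profiles outside PROFILE_SIZE; Pre_ excludes exactly those inputs.

-- shared module constant PROFILE_SIZE
def pvPROFILE_SIZE : PySem.Dict String Int :=
  PySem.Dict.ofList [("1g", 1), ("1g.5gb", 1), ("2g", 2), ("2g.10gb", 2), ("3g", 3),
    ("3g.20gb", 3), ("4g", 4), ("4g.20gb", 4), ("7g", 7), ("7g.40gb", 7)]

-- ===== PORT A =====
-- PROFILE_SIZE[profile] raises KeyError when absent (excluded by Pre_); getD 0 is never the default there.
def profiles_to_intervals_py (profiles : List String) : List (Int × Int × String) :=
  let r := profiles.foldl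
    (fun (st : List (Int × Int × String) × Int) profile =>
      let size := (pvPROFILE_SIZE.get? profile).getD 0
      (st.1 ++ [(st.2, st.2 + size, profile)], st.2 + size))
    ([], 0)
  if r.2 < 7 then r.1 ++ [(r.2, 7, "void")] else r.1

-- ===== PORT B =====
def profiles_to_intervals_py_alt (profiles : List String) : List (Int × Int × String) :=
  let sizes := profiles.map (fun p => (pvPROFILE_SIZE.get? p).getD 0)
  let total := sizes.sum
  let out0 : List (Int × Int × String) := if total < 7 then [(total, 7, "void")] else []
  let r := (profiles.reverse.zip sizes.reverse).foldl
    (fun (st : List (Int × Int × String) × Int) (ps : String × Int) =>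
      (st.1 ++ [(st.2 - ps.2, st.2, ps.1)], st.2 - ps.2))
    (out0, total)
  r.1.reverse

-- ===== PRECONDITION & SPEC =====
-- Pre_ excludes exactly the inputs where A (and B) raise KeyError: a profile not in PROFILE_SIZE.
def Pre_profiles_to_intervals_py (profiles : List String) : Prop :=
  (profiles.all (fun p => (pvPROFILE_SIZE.get? p).isSome)) = true
instance (profiles : List String) : Decidable (Pre_profiles_to_intervals_py profiles) := by
  unfold Pre_profiles_to_intervals_py; infer_instance
def pvWitness_profiles_to_intervals_py : List String := ["1g", "2g.10gb", "3g"]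

def Spec_profiles_to_intervals_py (profiles : List String) (out : List (Int × Int × String)) : Prop := out = profiles_to_intervals_py_alt profiles
instance (profiles : List String) (out : List (Int × Int × String)) : Decidable (Spec_profiles_to_intervals_py profiles out) := by unfold Spec_profiles_to_intervals_py; infer_instance

-- ===== CLAIM (what is proved, stated in full; the proofs are below) =====
def Claim_equal_profiles_to_intervals_py : Prop := ∀ (profiles : List String), Dom_profiles_to_intervals_py profiles → Pre_profiles_to_intervals_py profiles → Spec_profiles_to_intervals_py profiles (profiles_to_intervals_py profiles)

-- ===== LEMMAS AND PROOFS =====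

-- common spec: the interval list starting at offset cur
def pvSz (p : String) : Int := (pvPROFILE_SIZE.get? p).getD 0

def pvG (cur : Int) : List String → List (Int × Int × String)
  | [] => []
  | p :: ps => (cur, cur + pvSz p, p) :: pvG (cur + pvSz p) ps

def pvS (ps : List String) : Int := (ps.map pvSz).sum

theorem pvA_fold (ps : List String) : ∀ (acc : List (Int × Int × String)) (cur : Int),
    ps.foldl
      (fun (st : List (Int × Int × String) × Int) profile =>
        let size := (pvPROFILE_SIZE.get? profile).getD 0
        (st.1 ++ [(st.2, st.2 + size, profile)], st.2 + size))
      (acc, cur)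
    = (acc ++ pvG cur ps, cur + pvS ps) := by
  induction ps with
  | nil => intro acc cur; simp [pvG, pvS]
  | cons p ps ih =>
    intro acc cur
    simp only [List.foldl_cons, ih, pvG, pvS, List.map_cons, List.sum_cons, pvSz]
    simp [add_assoc]

theorem pvB_fold (ps : List String) : ∀ (acc : List (Int × Int × String)) (c : Int),
    ((ps.map (fun p => (p, pvSz p))).foldr
      (fun (x : String × Int) (st : List (Int × Int × String) × Int) =>
        (st.1 ++ [(st.2 - x.2, st.2, x.1)], st.2 - x.2))
      (acc, c))
    = (acc ++ (pvG (c - pvS ps) ps).reverse, c - pvS ps) := by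
  induction ps with
  | nil => intro acc c; simp [pvG, pvS]
  | cons p ps ih =>
    intro acc c
    simp only [List.map_cons, List.foldr_cons, ih, pvG, pvS, List.map_cons, List.sum_cons]
    have h1 : c - (pvSz p + (ps.map pvSz).sum) = c - (ps.map pvSz).sum - pvSz p := by ring
    have h2 : c - (ps.map pvSz).sum - pvSz p + pvSz p = c - (ps.map pvSz).sum := by ring
    simp [h1, h2]

theorem pvZipRev (ps : List String) :
    ps.reverse.zip ((ps.map pvSz).reverse) = (ps.map (fun p => (p, pvSz p))).reverse := by
  induction ps with
  | nil => rfl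
  | cons p ps ih =>
    simp only [List.reverse_cons, List.map_cons]
    rw [List.zip_append (by simp), ih]
    rfl

-- ===== VERDICT (by name: the statement is the Claim_ definition above) =====
theorem profiles_to_intervals_py_spec : Claim_equal_profiles_to_intervals_py := by
  intro profiles _ _
  unfold Spec_profiles_to_intervals_py profiles_to_intervals_py profiles_to_intervals_py_alt
  simp only
  rw [pvA_fold]
  have hmap : profiles.map (fun p => (pvPROFILE_SIZE.get? p).getD 0) = profiles.map pvSz := by
    simp [pvSz]
  rw [hmap, pvZipRev, List.foldl_reverse, pvB_fold]
  have hS : (profiles.map pvSz).sum = pvS profiles := rfl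
  simp only [hS, sub_self, zero_add]
  split_ifs with h <;> simp
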